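-- pv_equiv track=rewrite | github.com/AlexandreEichenberger/findmyteam | findmyteam/match/models.py | display_conjunction_list
-- ===== SOURCE A (Python) =====
-- def display_conjunction_list(conjunction, list): # list = [[pred, name], ...]
--   n = 0
--   i = 0
--   str = ""
--   for logic, name in list:
--     if logic:
--       n+=1
--   for logic, name in list:
--     if logic:
--       if i == 0:
--         str = name
--       elif i < n-1:
--         str += ", " + name
--       elif n == 2:
--         str += " %s %s" % (conjunction, name)
--       else:
--         str += ", and " + name
--       i += 1
--   return str
-- ===== SOURCE B (Python) =====
-- def display_conjunction_list(conjunction, list):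
--     names = [name for logic, name in list if logic]
--     if not names:
--         return ""
--     if len(names) == 1:
--         return names[0]
--     if len(names) == 2:
--         return "%s %s %s" % (names[0], conjunction, names[1])
--     return ", ".join(names[:-1]) + ", and " + names[-1]
-- ===== Notes on version B (the rewrite author's own statement) =====
-- stated objective: simpler
-- what changed: Replaces the count pass plus the index-threaded incremental concatenation with a single filter of the active names followed by a length dispatch using join.
import Mathlib
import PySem

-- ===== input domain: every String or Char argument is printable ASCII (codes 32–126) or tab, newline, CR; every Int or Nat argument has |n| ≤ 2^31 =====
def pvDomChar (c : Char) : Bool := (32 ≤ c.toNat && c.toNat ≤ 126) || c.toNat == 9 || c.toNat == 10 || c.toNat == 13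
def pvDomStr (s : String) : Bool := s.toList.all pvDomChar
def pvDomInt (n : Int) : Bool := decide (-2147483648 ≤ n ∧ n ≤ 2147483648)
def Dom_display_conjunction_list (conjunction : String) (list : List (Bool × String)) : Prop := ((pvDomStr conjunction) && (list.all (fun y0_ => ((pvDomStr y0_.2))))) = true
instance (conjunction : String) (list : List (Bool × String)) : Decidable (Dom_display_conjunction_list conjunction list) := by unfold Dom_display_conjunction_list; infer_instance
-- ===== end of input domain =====

-- B replaces A's count pass + index-threaded incremental concatenation with a filter of the
-- active names and a length dispatch using join (objective: simpler).

-- ===== PORT A =====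
-- first loop of A: count the entries whose predicate is true
def pvCountA (list : List (Bool × String)) : Int :=
  list.foldl (fun n p => if p.1 then n + 1 else n) 0

-- body of A's second loop: state is (i, str)
def pvStepA (conjunction : String) (n : Int) (st : Int × String) (p : Bool × String) :
    Int × String :=
  if p.1 then
    (st.1 + 1,
      if st.1 == 0 then p.2
      else if st.1 < n - 1 then st.2 ++ ", " ++ p.2
      else if n == 2 then st.2 ++ " " ++ conjunction ++ " " ++ p.2
      else st.2 ++ ", and " ++ p.2)
  else st

def display_conjunction_list (conjunction : String) (list : List (Bool × String)) : String :=
  (list.foldl (pvStepA conjunction (pvCountA list)) ((0 : Int), "")).2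

-- ===== PORT B =====
-- the list comprehension of Source B
def pvActiveNames (list : List (Bool × String)) : List String :=
  list.filterMap (fun p => if p.1 then some p.2 else none)

-- hand port of Python's sep.join(parts) (exact: '' on [], no trailing separator)
def pvJoinStr (sep : String) : List String → String
  | [] => ""
  | [a] => a
  | a :: b :: rest => a ++ sep ++ pvJoinStr sep (b :: rest)

def display_conjunction_list_alt (conjunction : String) (list : List (Bool × String)) : String :=
  match pvActiveNames list with
  | [] => ""
  | [a] => a
  | [a, b] => a ++ " " ++ conjunction ++ " " ++ b
  | a :: b :: c :: rest =>
      pvJoinStr ", " ((a :: b :: c :: rest).dropLast) ++ ", and "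
        ++ ((a :: b :: c :: rest).getLast (by simp))

-- ===== PRECONDITION & SPEC =====
def Spec_display_conjunction_list (conjunction : String) (list : List (Bool × String)) (out : String) : Prop := out = display_conjunction_list_alt conjunction list
instance (conjunction : String) (list : List (Bool × String)) (out : String) : Decidable (Spec_display_conjunction_list conjunction list out) := by unfold Spec_display_conjunction_list; infer_instance

-- ===== CLAIM (what is proved, stated in full; the proofs are below) =====
def Claim_equal_display_conjunction_list : Prop := ∀ (conjunction : String) (list : List (Bool × String)), Dom_display_conjunction_list conjunction list → Spec_display_conjunction_list conjunction list (display_conjunction_list conjunction list)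

-- ===== LEMMAS AND PROOFS =====

-- A's count equals the length of the filtered name list
theorem pvCountA_go (list : List (Bool × String)) (k : Int) :
    list.foldl (fun n p => if p.1 then n + 1 else n) k
      = k + (pvActiveNames list).length := by
  induction list generalizing k with
  | nil => simp [pvActiveNames]
  | cons p rest ih =>
    by_cases hp : p.1 <;> simp [pvActiveNames, hp, ih, List.filterMap_cons] at * <;> push_cast <;> ring

theorem pvCountA_eq (list : List (Bool × String)) :
    pvCountA list = ((pvActiveNames list).length : Int) := by
  simpa using pvCountA_go list 0

-- A's second loop only touches active entries: it is a fold over the filtered names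
theorem pvFold_filter (conjunction : String) (n : Int)
    (list : List (Bool × String)) (st : Int × String) :
    list.foldl (pvStepA conjunction n) st
      = (pvActiveNames list).foldl
          (fun (st : Int × String) (x : String) =>
            (st.1 + 1,
              if st.1 == 0 then x
              else if st.1 < n - 1 then st.2 ++ ", " ++ x
              else if n == 2 then st.2 ++ " " ++ conjunction ++ " " ++ x
              else st.2 ++ ", and " ++ x)) st := by
  induction list generalizing st with
  | nil => rfl
  | cons p rest ih =>
    by_cases hp : p.1 <;>
      simp [pvActiveNames, List.filterMap_cons, hp, pvStepA, ih] at *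

-- middle of the loop: while 1 ≤ i and i < n - 1 only ", " ++ name is appended
theorem pvFold_mid (conjunction : String) (n : Int) (mid : List String) :
    ∀ (j : Int) (s : String), 1 ≤ j → j + mid.length < n →
    mid.foldl
      (fun (st : Int × String) (x : String) =>
        (st.1 + 1,
          if st.1 == 0 then x
          else if st.1 < n - 1 then st.2 ++ ", " ++ x
          else if n == 2 then st.2 ++ " " ++ conjunction ++ " " ++ x
          else st.2 ++ ", and " ++ x)) (j, s)
      = (j + mid.length, s ++ (if mid = [] then "" else ", " ++ pvJoinStr ", " mid)) := by
  induction mid with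
  | nil => intro j s _ _; simp [String.append_empty]
  | cons x rest ih =>
    intro j s hj hlt
    have hj0 : (j == 0) = false := by simp; omega
    have hjlt : j < n - 1 := by simp at hlt ⊢; omega
    simp only [List.foldl_cons, hj0, Bool.false_eq_true, if_false, if_pos hjlt]
    cases rest with
    | nil => simp [pvJoinStr, String.append_assoc]
    | cons y t =>
      rw [ih (j + 1) (s ++ ", " ++ x) (by omega) (by simp at hlt ⊢; omega)]
      rw [Prod.mk.injEq]
      refine ⟨by simp; omega, ?_⟩
      simp [pvJoinStr, String.append_assoc]

theorem display_conjunction_list_eq (conjunction : String) (list : List (Bool × String)) :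
    display_conjunction_list conjunction list
      = display_conjunction_list_alt conjunction list := by
  unfold display_conjunction_list display_conjunction_list_alt
  rw [pvCountA_eq, pvFold_filter]
  cases h : pvActiveNames list with
  | nil => simp
  | cons a rest =>
    cases rest with
    | nil => simp
    | cons b rest2 =>
      cases rest2 with
      | nil => simp
      | cons c rest3 =>
        rw [show (match a :: b :: c :: rest3 with
          | [] => ""
          | [a] => a
          | [a, b] => a ++ " " ++ conjunction ++ " " ++ b
          | a :: b :: c :: rest =>
              pvJoinStr ", " ((a :: b :: c :: rest).dropLast) ++ ", and "
                ++ ((a :: b :: c :: rest).getLast (by simp)))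
          = pvJoinStr ", " ((a :: b :: c :: rest3).dropLast) ++ ", and "
              ++ ((a :: b :: c :: rest3).getLast (by simp)) from rfl]
        obtain ⟨mid, z, hmz⟩ : ∃ mid z, b :: c :: rest3 = mid ++ [z] :=
          ⟨(b :: c :: rest3).dropLast, (b :: c :: rest3).getLast (by simp),
            (List.dropLast_append_getLast (by simp)).symm⟩
        have hmidne : mid ≠ [] := by
          rcases mid with _ | ⟨m, ms⟩
          · exfalso; simpa using hmz
          · simp
        have hml : 1 ≤ mid.length := by
          rcases mid with _ | ⟨m, ms⟩
          · exact absurd rfl hmidne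
          · simp
        set N : Int := ((a :: b :: c :: rest3).length : Int) with hN
        have hNlen : N = (mid.length : Int) + 2 := by
          have hc := congrArg List.length hmz
          simp at hc
          simp [hN]
          omega
        rw [hmz]
        simp only [List.foldl_cons]
        have hinit : ((0:Int) + 1,
            if (0:Int) == 0 then a
            else if (0:Int) < N - 1 then "" ++ ", " ++ a
            else if N == 2 then "" ++ " " ++ conjunction ++ " " ++ a
            else "" ++ ", and " ++ a) = ((1:Int), a) := by norm_num
        rw [hinit]
        rw [List.foldl_append]
        rw [pvFold_mid conjunction N mid 1 a le_rfl (by omega)]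
        have hlast1 : ((1 + (mid.length : Int)) == 0) = false := by simp; omega
        have hlast2 : ¬ ((1 + (mid.length : Int)) < N - 1) := by omega
        have hlast3 : (N == 2) = false := by simp [hNlen]; omega
        simp only [List.foldl_cons, List.foldl_nil, hlast1, Bool.false_eq_true, if_false,
          if_neg hlast2, hlast3]
        have hdrop : (a :: (mid ++ [z])).dropLast = a :: mid := by
          rw [show a :: (mid ++ [z]) = (a :: mid) ++ [z] from by simp, List.dropLast_concat]
        have hlastz : (a :: (mid ++ [z])).getLast (by simp) = z := by
          simp
        rw [hdrop, hlastz, if_neg hmidne]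
        rcases mid with _ | ⟨m, ms⟩
        · exact absurd rfl hmidne
        · simp [pvJoinStr, String.append_assoc]

-- ===== VERDICT (by name: the statement is the Claim_ definition above) =====
theorem display_conjunction_list_spec : Claim_equal_display_conjunction_list := by
  intro conjunction list _
  exact display_conjunction_list_eq conjunction list
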